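-- pv_equiv track=rewrite | github.com/o-bscure/AoC2021 | day4_pt2.py | count_unmarked
-- ===== SOURCE A (Python) =====
-- def count_unmarked(array_2d, marked):
--     unmarked_values = []
--     for i in range(len(array_2d)):
--         for j in range(len(array_2d[i])):
--             if (i,j) not in marked:
--                 value = array_2d[i][j]
--                 unmarked_values.append(value)
--     return sum(unmarked_values)
-- ===== SOURCE B (Python) =====
-- def count_unmarked(array_2d, marked):
--     total = sum(v for row in array_2d for v in row)
--     sub = 0
--     for (i, j) in set(marked):
--         if 0 <= i < len(array_2d) and 0 <= j < len(array_2d[i]):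
--             sub += array_2d[i][j]
--     return total - sub
-- ===== Notes on version B (the rewrite author's own statement) =====
-- stated objective: faster
-- what changed: Instead of scanning every grid cell and testing (i,j) membership in the marked list (appending unmarked values to a list), B sums the whole grid once and subtracts the cells at the deduplicated, bounds-checked marked coordinates.
import Mathlib
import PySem

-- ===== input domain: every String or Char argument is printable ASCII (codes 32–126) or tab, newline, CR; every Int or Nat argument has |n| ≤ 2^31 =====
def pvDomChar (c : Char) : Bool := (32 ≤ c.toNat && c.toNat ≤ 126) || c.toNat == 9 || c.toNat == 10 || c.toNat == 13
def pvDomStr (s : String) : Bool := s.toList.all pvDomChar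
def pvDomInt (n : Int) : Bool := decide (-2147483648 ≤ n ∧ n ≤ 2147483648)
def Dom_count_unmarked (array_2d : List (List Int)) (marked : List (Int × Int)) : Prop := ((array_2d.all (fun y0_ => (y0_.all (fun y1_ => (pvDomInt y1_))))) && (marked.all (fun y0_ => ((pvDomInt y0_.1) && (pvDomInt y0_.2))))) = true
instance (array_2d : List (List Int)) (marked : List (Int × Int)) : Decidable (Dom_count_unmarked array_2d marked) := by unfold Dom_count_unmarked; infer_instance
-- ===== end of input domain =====

-- B replaces A's quadratic cell-by-cell membership scan by one total-sum pass minus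
-- the (deduplicated, bounds-checked) marked cells: objective 'faster' (constant/asymptotic
-- in len(marked) per cell), same return value on every input.

-- ===== PORT A =====
-- loop indices come from range(len(..)) and are provably in range, so pyGetD with a default is exact
def count_unmarked (array_2d : List (List Int)) (marked : List (Int × Int)) : Int :=
  ((PySem.List.pyRange 0 (array_2d.length : Int) 1).foldl (fun acc i =>
    (PySem.List.pyRange 0 ((PySem.List.pyGetD array_2d i []).length : Int) 1).foldl (fun acc2 j =>
      if (i, j) ∉ marked then acc2 ++ [PySem.List.pyGetD (PySem.List.pyGetD array_2d i []) j 0] else acc2) acc)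
    ([] : List Int)).sum

-- ===== PORT B =====
-- the bounds check guards the lookups, so pyGetD with a default is exact
def count_unmarked_alt (array_2d : List (List Int)) (marked : List (Int × Int)) : Int :=
  let total := (array_2d.flatMap (fun row => row)).sum
  let sub := (PySem.Set.ofList marked).foldl (fun s p =>
      if 0 ≤ p.1 ∧ p.1 < (array_2d.length : Int) ∧ 0 ≤ p.2 ∧
           p.2 < ((PySem.List.pyGetD array_2d p.1 []).length : Int)
      then s + PySem.List.pyGetD (PySem.List.pyGetD array_2d p.1 []) p.2 0 else s) (0 : Int)
  total - sub

-- ===== PRECONDITION & SPEC =====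
def Spec_count_unmarked (array_2d : List (List Int)) (marked : List (Int × Int)) (out : Int) : Prop := out = count_unmarked_alt array_2d marked
instance (array_2d : List (List Int)) (marked : List (Int × Int)) (out : Int) : Decidable (Spec_count_unmarked array_2d marked out) := by unfold Spec_count_unmarked; infer_instance

-- ===== CLAIM (what is proved, stated in full; the proofs are below) =====
def Claim_equal_count_unmarked : Prop := ∀ (array_2d : List (List Int)) (marked : List (Int × Int)), Dom_count_unmarked array_2d marked → Spec_count_unmarked array_2d marked (count_unmarked array_2d marked)

-- ===== LEMMAS AND PROOFS =====

-- the cell at (i, j), and the in-bounds predicate B checks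
def pvCell (a : List (List Int)) (p : Int × Int) : Int :=
  PySem.List.pyGetD (PySem.List.pyGetD a p.1 []) p.2 0

-- the list of in-bounds marked positions, row by row
def pvMarkList (a : List (List Int)) (m : List (Int × Int)) : List (Int × Int) :=
  (PySem.List.pyRange 0 (a.length : Int) 1).flatMap (fun i =>
    ((PySem.List.pyRange 0 ((PySem.List.pyGetD a i []).length : Int) 1).filter
        (fun j => decide ((i, j) ∈ m))).map (fun j => (i, j)))

lemma sum_map_sub_int (l : List Int) (f g : Int → Int) :
    (l.map f).sum - (l.map g).sum = (l.map (fun x => f x - g x)).sum := by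
  induction l with
  | nil => simp
  | cons x t ih => simp [List.map_cons, List.sum_cons, ← ih]; ring

lemma sum_map_filter_split (l : List Int) (p : Int → Bool) (f : Int → Int) :
    ((l.filter (fun x => !p x)).map f).sum = (l.map f).sum - ((l.filter p).map f).sum := by
  induction l with
  | nil => simp
  | cons x t ih =>
    by_cases h : p x = true
    · simp [h, ih]
    · simp [h, ih]; ring

lemma markList_nodup (a : List (List Int)) (m : List (Int × Int)) :
    (pvMarkList a m).Nodup := by
  unfold pvMarkList
  rw [List.nodup_flatMap]
  constructor
  · intro i _
    exact ((PySem.List.nodup_pyRange_one _ _).filter _).map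
      (fun j j' h => by simpa using congrArg Prod.snd h)
  · refine (PySem.List.nodup_pyRange_one _ _).imp ?_
    intro i i' hne p hp hp'
    simp only [List.mem_map, List.mem_filter] at hp hp'
    obtain ⟨j, _, rfl⟩ := hp
    obtain ⟨j', _, h⟩ := hp'
    exact hne (congrArg Prod.fst h).symm

lemma mem_markList (a : List (List Int)) (m : List (Int × Int)) (p : Int × Int) :
    p ∈ pvMarkList a m ↔ p ∈ m ∧ (0 ≤ p.1 ∧ p.1 < (a.length : Int) ∧ 0 ≤ p.2 ∧
      p.2 < ((PySem.List.pyGetD a p.1 []).length : Int)) := by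
  unfold pvMarkList
  simp only [List.mem_flatMap, List.mem_map, List.mem_filter,
    PySem.List.mem_pyRange_one, decide_eq_true_eq]
  constructor
  · rintro ⟨i, ⟨hi0, hin⟩, j, ⟨⟨hj0, hjn⟩, hm⟩, rfl⟩
    exact ⟨hm, hi0, hin, hj0, hjn⟩
  · rintro ⟨hm, hi0, hin, hj0, hjn⟩
    exact ⟨p.1, ⟨hi0, hin⟩, p.2, ⟨⟨hj0, hjn⟩, by simpa using hm⟩, rfl⟩

-- B's subtracted amount is the sum of the cells at the in-bounds marked positions
lemma sub_eq (a : List (List Int)) (m : List (Int × Int)) :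
    ((PySem.Set.ofList m).foldl (fun s p =>
        if 0 ≤ p.1 ∧ p.1 < (a.length : Int) ∧ 0 ≤ p.2 ∧
             p.2 < ((PySem.List.pyGetD a p.1 []).length : Int)
        then s + PySem.List.pyGetD (PySem.List.pyGetD a p.1 []) p.2 0 else s) (0 : Int))
      = ((pvMarkList a m).map (pvCell a)).sum := by
  have h1 := PySem.List.foldl_ite_eq_foldl_filter
      (l := PySem.Set.ofList m)
      (p := fun p => 0 ≤ p.1 ∧ p.1 < (a.length : Int) ∧ 0 ≤ p.2 ∧
             p.2 < ((PySem.List.pyGetD a p.1 []).length : Int))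
      (f := fun s p => s + pvCell a p) (init := (0 : Int))
  have hperm : ((PySem.Set.ofList m).filter (fun p => decide (0 ≤ p.1 ∧ p.1 < (a.length : Int) ∧ 0 ≤ p.2 ∧
             p.2 < ((PySem.List.pyGetD a p.1 []).length : Int)))).Perm
      (pvMarkList a m) := by
    rw [List.perm_ext_iff_of_nodup ((PySem.Set.nodup_ofList m).filter _) (markList_nodup a m)]
    intro p
    simp only [List.mem_filter, PySem.Set.mem_ofList, mem_markList, decide_eq_true_eq]
  calc _ = ((PySem.Set.ofList m).foldl (fun s p => if (0 ≤ p.1 ∧ p.1 < (a.length : Int) ∧ 0 ≤ p.2 ∧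
             p.2 < ((PySem.List.pyGetD a p.1 []).length : Int)) then s + pvCell a p else s) (0 : Int)) := rfl
    _ = (((PySem.Set.ofList m).filter (fun p => decide (0 ≤ p.1 ∧ p.1 < (a.length : Int) ∧ 0 ≤ p.2 ∧
             p.2 < ((PySem.List.pyGetD a p.1 []).length : Int)))).foldl (fun s p => s + pvCell a p) (0 : Int)) := h1
    _ = (((PySem.Set.ofList m).filter (fun p => decide (0 ≤ p.1 ∧ p.1 < (a.length : Int) ∧ 0 ≤ p.2 ∧
             p.2 < ((PySem.List.pyGetD a p.1 []).length : Int)))).map (pvCell a)).sum := by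
          rw [PySem.List.foldl_add]; simp
    _ = ((pvMarkList a m).map (pvCell a)).sum := (hperm.map (pvCell a)).sum_eq

-- A's value, written as a per-row sum over the index range
lemma a_eq (a : List (List Int)) (m : List (Int × Int)) :
    count_unmarked a m
      = ((PySem.List.pyRange 0 (a.length : Int) 1).map (fun i =>
          ((((PySem.List.pyRange 0 ((PySem.List.pyGetD a i []).length : Int) 1).filter
              (fun j => !decide ((i, j) ∈ m))).map
              (fun j => PySem.List.pyGetD (PySem.List.pyGetD a i []) j 0)).sum))).sum := by
  unfold count_unmarked
  have hin : ∀ (i : Int) (acc : List Int),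
      (PySem.List.pyRange 0 ((PySem.List.pyGetD a i []).length : Int) 1).foldl (fun acc2 j =>
        if (i, j) ∉ m then acc2 ++ [PySem.List.pyGetD (PySem.List.pyGetD a i []) j 0] else acc2) acc
      = acc ++ ((PySem.List.pyRange 0 ((PySem.List.pyGetD a i []).length : Int) 1).filter
          (fun j => !decide ((i, j) ∈ m))).map
          (fun j => PySem.List.pyGetD (PySem.List.pyGetD a i []) j 0) := by
    intro i acc
    have := PySem.List.foldl_append_ite
      (l := PySem.List.pyRange 0 ((PySem.List.pyGetD a i []).length : Int) 1)
      (p := fun j => (i, j) ∉ m)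
      (f := fun j => PySem.List.pyGetD (PySem.List.pyGetD a i []) j 0) (acc := acc)
    simpa using this
  have hcong := PySem.List.foldl_congr_mem
      (l := PySem.List.pyRange 0 (a.length : Int) 1) (init := ([] : List Int))
      (f := fun acc i =>
        (PySem.List.pyRange 0 ((PySem.List.pyGetD a i []).length : Int) 1).foldl (fun acc2 j =>
          if (i, j) ∉ m then acc2 ++ [PySem.List.pyGetD (PySem.List.pyGetD a i []) j 0] else acc2) acc)
      (g := fun acc i => acc ++
        ((PySem.List.pyRange 0 ((PySem.List.pyGetD a i []).length : Int) 1).filter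
          (fun j => !decide ((i, j) ∈ m))).map
          (fun j => PySem.List.pyGetD (PySem.List.pyGetD a i []) j 0))
      (by intro acc i _; exact hin i acc)
  rw [hcong]
  rw [PySem.List.foldl_append_eq_flatMap]
  simp [List.flatMap_def, List.sum_flatten, List.map_map, Function.comp_def]

theorem count_unmarked_spec : Claim_equal_count_unmarked := by
  intro a m _
  unfold Spec_count_unmarked count_unmarked_alt
  rw [a_eq a m]
  show _ = (a.flatMap (fun row => row)).sum - _
  rw [sub_eq a m]
  have htot : (a.flatMap (fun row => row)).sum
      = ((PySem.List.pyRange 0 (a.length : Int) 1).map (fun i => (PySem.List.pyGetD a i []).sum)).sum := by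
    conv_lhs => rw [← PySem.List.map_pyGetD_pyRange_zero (xs := a) (d := ([] : List Int))]
    simp [List.flatMap_def, List.sum_flatten, List.map_map, Function.comp_def]
  have hmark : ((pvMarkList a m).map (pvCell a)).sum
      = ((PySem.List.pyRange 0 (a.length : Int) 1).map (fun i =>
          (((PySem.List.pyRange 0 ((PySem.List.pyGetD a i []).length : Int) 1).filter
            (fun j => decide ((i, j) ∈ m))).map
            (fun j => PySem.List.pyGetD (PySem.List.pyGetD a i []) j 0)).sum)).sum := by
    unfold pvMarkList
    rw [List.map_flatMap]
    simp [pvCell, List.flatMap_def, List.sum_flatten, List.map_map, Function.comp_def]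
  rw [htot, hmark, sum_map_sub_int]
  refine congrArg List.sum (List.map_congr_left ?_)
  intro i _
  rw [sum_map_filter_split _ (fun j => decide ((i, j) ∈ m))]
  congr 1
  exact congrArg List.sum (PySem.List.map_pyGetD_pyRange_zero (xs := PySem.List.pyGetD a i []) (d := (0 : Int)))
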